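-- pv_equiv track=rewrite | github.com/loureed691/RAD | position_correlation.py | _are_categories_related
-- ===== SOURCE A (Python) =====
-- def _are_categories_related(cat1: str, cat2: str) -> bool:
--     """
--     Check if two categories are related
--
--     Args:
--         cat1: First category
--         cat2: Second category
--
--     Returns:
--         True if categories are related
--     """
--     related_groups = [
--         {'defi_protocols', 'defi_exchanges'},
--         {'layer1_high_cap', 'layer1_mid_cap'},
--         {'btc_group', 'eth_group'},  # Majors often move together
--         {'gaming_meta', 'ai_data'}  # Tech-focused tokens
--     ]
--
--     for group in related_groups:
--         if cat1 in group and cat2 in group: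
--             return True
--
--     return False
-- ===== SOURCE B (Python) =====
-- _RELATED_GROUPS = [
--     ('defi_protocols', 'defi_exchanges'),
--     ('layer1_high_cap', 'layer1_mid_cap'),
--     ('btc_group', 'eth_group'),
--     ('gaming_meta', 'ai_data'),
-- ]
--
-- _MEMBER_TO_GROUP = {member: idx
--                     for idx, group in enumerate(_RELATED_GROUPS)
--                     for member in group}
--
--
-- def _are_categories_related(cat1: str, cat2: str) -> bool:
--     return cat1 in _MEMBER_TO_GROUP and _MEMBER_TO_GROUP[cat1] == _MEMBER_TO_GROUP.get(cat2)
-- ===== Notes on version B (the rewrite author's own statement) =====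
-- stated objective: idiomatic
-- what changed: Replaces the per-call loop over a list of sets with a module-level member-to-group-index dict built once; the check becomes a guarded pair of O(1) lookups with no loop at call time.
import Mathlib
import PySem

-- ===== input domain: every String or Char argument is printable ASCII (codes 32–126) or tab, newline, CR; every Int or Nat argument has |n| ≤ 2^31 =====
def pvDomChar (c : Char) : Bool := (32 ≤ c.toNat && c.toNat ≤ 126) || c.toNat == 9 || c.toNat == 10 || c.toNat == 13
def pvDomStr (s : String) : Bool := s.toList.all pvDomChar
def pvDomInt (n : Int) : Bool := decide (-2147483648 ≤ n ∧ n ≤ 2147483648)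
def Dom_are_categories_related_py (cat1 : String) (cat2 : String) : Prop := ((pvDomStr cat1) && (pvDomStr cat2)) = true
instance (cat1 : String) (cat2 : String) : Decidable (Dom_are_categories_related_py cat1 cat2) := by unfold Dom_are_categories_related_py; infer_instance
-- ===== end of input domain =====

-- B replaces A's per-call loop over a list of sets by a member→group-index dict built
-- once, so the call is a guarded pair of lookups (idiomatic; no loop at call time).

-- ===== PORT A =====
-- related_groups: the list of four Python set literals
def pvRelatedGroupsA : List (PySem.Set String) :=
  [PySem.Set.ofList ["defi_protocols", "defi_exchanges"],
   PySem.Set.ofList ["layer1_high_cap", "layer1_mid_cap"],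
   PySem.Set.ofList ["btc_group", "eth_group"],
   PySem.Set.ofList ["gaming_meta", "ai_data"]]

-- the 'for group in related_groups: if … return True' loop with early return
def pvLoopA (cat1 cat2 : String) : List (PySem.Set String) → Bool
  | [] => false
  | g :: rest =>
      if PySem.Set.contains g cat1 && PySem.Set.contains g cat2 then true
      else pvLoopA cat1 cat2 rest

def are_categories_related_py (cat1 : String) (cat2 : String) : Bool :=
  pvLoopA cat1 cat2 pvRelatedGroupsA

-- ===== PORT B =====
-- _RELATED_GROUPS: pairs of member names
def pvRelatedGroupsB : List (String × String) :=
  [("defi_protocols", "defi_exchanges"),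
   ("layer1_high_cap", "layer1_mid_cap"),
   ("btc_group", "eth_group"),
   ("gaming_meta", "ai_data")]

-- _MEMBER_TO_GROUP = {member: idx for idx, group in enumerate(_RELATED_GROUPS) for member in group}
def pvMemberToGroup : PySem.Dict String Int :=
  (PySem.List.enumerate pvRelatedGroupsB).foldl
    (fun d p => (d.insert p.2.1 p.1).insert p.2.2 p.1) PySem.Dict.empty

-- 'cat1 in d and d[cat1] == d.get(cat2)'; Python's int == Optional[int] is False on None,
-- which is exactly Option's ==, so under the guard 'd[cat1] == d.get(cat2)' is get? == get?.
def are_categories_related_py_alt (cat1 : String) (cat2 : String) : Bool :=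
  pvMemberToGroup.contains cat1 &&
    (pvMemberToGroup.get? cat1 == pvMemberToGroup.get? cat2)

-- ===== PRECONDITION & SPEC =====
def Spec_are_categories_related_py (cat1 : String) (cat2 : String) (out : Bool) : Prop := out = are_categories_related_py_alt cat1 cat2
instance (cat1 : String) (cat2 : String) (out : Bool) : Decidable (Spec_are_categories_related_py cat1 cat2 out) := by unfold Spec_are_categories_related_py; infer_instance

-- ===== CLAIM (what is proved, stated in full; the proofs are below) =====
def Claim_equal_are_categories_related_py : Prop := ∀ (cat1 : String) (cat2 : String), Dom_are_categories_related_py cat1 cat2 → Spec_are_categories_related_py cat1 cat2 (are_categories_related_py cat1 cat2)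

-- ===== LEMMAS AND PROOFS =====

-- every string is one of the eight member names, or none of them
theorem pvSplit (c : String) :
    c = "defi_protocols" ∨ c = "defi_exchanges" ∨ c = "layer1_high_cap" ∨ c = "layer1_mid_cap" ∨
    c = "btc_group" ∨ c = "eth_group" ∨ c = "gaming_meta" ∨ c = "ai_data" ∨
    (c ≠ "defi_protocols" ∧ c ≠ "defi_exchanges" ∧ c ≠ "layer1_high_cap" ∧ c ≠ "layer1_mid_cap" ∧
     c ≠ "btc_group" ∧ c ≠ "eth_group" ∧ c ≠ "gaming_meta" ∧ c ≠ "ai_data") := by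
  by_cases h1 : c = "defi_protocols" <;> by_cases h2 : c = "defi_exchanges" <;>
  by_cases h3 : c = "layer1_high_cap" <;> by_cases h4 : c = "layer1_mid_cap" <;>
  by_cases h5 : c = "btc_group" <;> by_cases h6 : c = "eth_group" <;>
  by_cases h7 : c = "gaming_meta" <;> by_cases h8 : c = "ai_data" <;> tauto

set_option maxHeartbeats 1600000 in
theorem pvKey (c1 c2 : String) :
    are_categories_related_py c1 c2 = are_categories_related_py_alt c1 c2 := by
  have hd : pvMemberToGroup = PySem.Dict.mk
      [("defi_protocols", 0), ("defi_exchanges", 0), ("layer1_high_cap", 1), ("layer1_mid_cap", 1),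
       ("btc_group", 2), ("eth_group", 2), ("gaming_meta", 3), ("ai_data", 3)] := by rfl
  have ha : pvRelatedGroupsA =
      [["defi_protocols", "defi_exchanges"], ["layer1_high_cap", "layer1_mid_cap"],
       ["btc_group", "eth_group"], ["gaming_meta", "ai_data"]] := by rfl
  rcases pvSplit c1 with h|h|h|h|h|h|h|h|h <;>
  rcases pvSplit c2 with g|g|g|g|g|g|g|g|g <;>
  simp_all [are_categories_related_py, are_categories_related_py_alt, pvLoopA, ha, hd,
    PySem.Set.contains, PySem.Dict.get?_mk_cons, PySem.Dict.contains_mk]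
  all_goals first
    | (intro hx; rcases hx with e|e|e|e|e|e|e|e <;> subst e <;> simp_all)
    | (split_ifs <;> simp_all [eq_comm, PySem.Dict.get?])

-- ===== VERDICT (by name: the statement is the Claim_ definition above) =====
theorem are_categories_related_py_spec : Claim_equal_are_categories_related_py := by
  intro c1 c2 _
  unfold Spec_are_categories_related_py
  exact pvKey c1 c2
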